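-- pv_equiv track=rewrite | github.com/pypi-data/pypi-mirror-398 | packages/ATaRVa/atarva-0.4.0-py3-none-any.whl/ATARVA/decomp_utils.py | kmp_search_non_overlapping
-- ===== SOURCE A (Python) =====
-- def kmp_search_non_overlapping(text, pattern):
--     def compute_lps(pattern):
--         lps = [0] * len(pattern)
--         length = 0
--         i = 1
--         while i < len(pattern):
--             if pattern[i] == pattern[length]:
--                 length += 1
--                 lps[i] = length
--                 i += 1
--             else:
--                 if length != 0:
--                     length = lps[length - 1]
--                 else:
--                     lps[i] = 0
--                     i += 1
--         return lps
--
--     lps = compute_lps(pattern)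
--     result = []
--     i = 0
--     j = 0
--
--     while i < len(text):
--         if pattern[j] == text[i]:
--             i += 1
--             j += 1
--
--         if j == len(pattern):
--             result.append(i - j)
--             j = 0
--         elif i < len(text) and pattern[j] != text[i]:
--             if j != 0:
--                 j = lps[j - 1]
--             else:
--                 i += 1
--
--     return result
-- ===== SOURCE B (Python) =====
-- def kmp_search_non_overlapping(text, pattern):
--     # Greedy scan with str.find: repeatedly take the leftmost match and jump past it.
--     if not pattern:
--         return []
--     result = []
--     i = 0
--     while True:
--         idx = text.find(pattern, i)
--         if idx == -1:
--             break
--         result.append(idx)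
--         i = idx + len(pattern)
--     return result
-- ===== Notes on version B (the rewrite author's own statement) =====
-- stated objective: simpler
-- what changed: Replaces the KMP failure-function machinery (LPS table plus character-by-character backtracking scan) with a greedy loop repeatedly calling str.find and jumping past each leftmost match.
import Mathlib
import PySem

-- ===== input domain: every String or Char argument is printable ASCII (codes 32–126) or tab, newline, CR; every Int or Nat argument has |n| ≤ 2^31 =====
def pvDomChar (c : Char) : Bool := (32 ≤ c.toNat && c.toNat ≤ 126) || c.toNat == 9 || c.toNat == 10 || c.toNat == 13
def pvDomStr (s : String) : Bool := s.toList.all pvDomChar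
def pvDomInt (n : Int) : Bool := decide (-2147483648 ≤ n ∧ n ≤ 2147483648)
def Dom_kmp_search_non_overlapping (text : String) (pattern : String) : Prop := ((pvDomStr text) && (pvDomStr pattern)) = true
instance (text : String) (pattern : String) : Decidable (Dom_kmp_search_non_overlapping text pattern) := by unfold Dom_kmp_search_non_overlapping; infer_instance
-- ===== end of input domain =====

-- B replaces the KMP failure-function machinery with a greedy str.find scan; equivalence is
-- proved on all inputs where A returns (A raises IndexError iff pattern = "" and text ≠ "").

-- ===== PORT A =====
-- Literal port of A over List Char. Python's nonnegative loop counters i/j/length are Nats; the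
-- list accesses use getD (in range wherever Python's are, i.e. on every input Pre_ admits); the
-- while-loops become fuel recursion, the fuel a guard only (proved sufficient in the lemmas below).
def pvLpsLoop : Nat → List Nat → Nat → Nat → List Char → List Nat
  | 0, lps, _, _, _ => lps
  | fuel+1, lps, length, i, p =>
    if i < p.length then
      if p.getD i ' ' = p.getD length ' ' then
        pvLpsLoop fuel (lps.set i (length+1)) (length+1) (i+1) p
      else if length ≠ 0 then
        pvLpsLoop fuel lps (lps.getD (length-1) 0) i p
      else
        pvLpsLoop fuel (lps.set i 0) 0 (i+1) p
    else lps

def pvComputeLps (p : List Char) : List Nat :=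
  pvLpsLoop (2 * p.length + 1) (List.replicate p.length 0) 0 1 p

def pvKmpLoop : Nat → List Int → Nat → Nat → List Char → List Char → List Nat → List Int
  | 0, res, _, _, _, _, _ => res
  | fuel+1, res, i, j, t, p, lps =>
    if i < t.length then
      let ij := if p.getD j ' ' = t.getD i ' ' then (i+1, j+1) else (i, j)
      if ij.2 = p.length then
        pvKmpLoop fuel (res ++ [(ij.1 : Int) - (ij.2 : Int)]) ij.1 0 t p lps
      else if ij.1 < t.length ∧ p.getD ij.2 ' ' ≠ t.getD ij.1 ' ' then
        if ij.2 ≠ 0 then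
          pvKmpLoop fuel res ij.1 (lps.getD (ij.2 - 1) 0) t p lps
        else
          pvKmpLoop fuel res (ij.1 + 1) ij.2 t p lps
      else
        pvKmpLoop fuel res ij.1 ij.2 t p lps
    else res

def kmp_search_non_overlapping (text : String) (pattern : String) : List Int :=
  pvKmpLoop (2 * text.toList.length + pattern.toList.length + 1) [] 0 0
    text.toList pattern.toList (pvComputeLps pattern.toList)

-- ===== PORT B =====
-- text.find(pattern, i) is PySem.Chars.findFrom on the code points; the while True loop is a fuel
-- recursion (fuel is a guard only, proved sufficient below); idx ≥ 0 whenever idx ≠ -1, so i = idx + m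
-- is tracked as the Nat idx.toNat + p.length, exactly Python's value.
def pvGreedyLoop : Nat → List Char → List Char → Nat → List Int
  | 0, _, _, _ => []
  | fuel+1, t, p, i =>
    let idx := PySem.Chars.findFrom t p (i : Int) none
    if idx = -1 then [] else idx :: pvGreedyLoop fuel t p (idx.toNat + p.length)

def kmp_search_non_overlapping_alt (text : String) (pattern : String) : List Int :=
  if pattern.toList = [] then []
  else pvGreedyLoop (text.toList.length + 1) text.toList pattern.toList 0

-- ===== PRECONDITION & SPEC =====
-- Pre_ excludes exactly the inputs where A raises: pattern = "" with text ≠ "" (IndexError at pattern[0]).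
def Pre_kmp_search_non_overlapping (text : String) (pattern : String) : Prop := pattern = "" → text = ""
instance (text : String) (pattern : String) : Decidable (Pre_kmp_search_non_overlapping text pattern) := by unfold Pre_kmp_search_non_overlapping; infer_instance
def pvWitness_kmp_search_non_overlapping : String × String := ("abcabcab", "abc")

def Spec_kmp_search_non_overlapping (text : String) (pattern : String) (out : List Int) : Prop := out = kmp_search_non_overlapping_alt text pattern
instance (text : String) (pattern : String) (out : List Int) : Decidable (Spec_kmp_search_non_overlapping text pattern out) := by unfold Spec_kmp_search_non_overlapping; infer_instance

-- ===== CLAIM (what is proved, stated in full; the proofs are below) =====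
def Claim_equal_kmp_search_non_overlapping : Prop := ∀ (text : String) (pattern : String), Dom_kmp_search_non_overlapping text pattern → Pre_kmp_search_non_overlapping text pattern → Spec_kmp_search_non_overlapping text pattern (kmp_search_non_overlapping text pattern)

-- ===== LEMMAS AND PROOFS =====

-- l is a (proper) border of p.take k: p.take l is both a prefix and a suffix of p.take k, l < k.
def pvBordB (p : List Char) (k l : Nat) : Bool :=
  decide (l < k) && decide ((p.take k).drop (k - l) = p.take l)

def pvBord (p : List Char) (k l : Nat) : Prop := pvBordB p k l = true

-- the longest proper border of p.take k (0 if k = 0)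
def pvMaxBord (p : List Char) (k : Nat) : Nat :=
  Nat.findGreatest (fun l => pvBordB p k l = true) (k - 1)

theorem pvBord_iff (p : List Char) (k l : Nat) :
    pvBord p k l ↔ l < k ∧ (p.take k).drop (k - l) = p.take l := by
  simp [pvBord, pvBordB]

theorem pvBord_zero (p : List Char) (k : Nat) (hk : 1 ≤ k) : pvBord p k 0 := by
  rw [pvBord_iff]
  refine ⟨hk, ?_⟩
  simp [List.drop_eq_nil_of_le]

theorem pvBord_nest (p : List Char) (k a b : Nat) (ha : pvBord p k a) (hb : pvBord p k b)
    (hab : a < b) : pvBord p b a := by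
  rw [pvBord_iff] at *
  obtain ⟨ha1, ha2⟩ := ha
  obtain ⟨hb1, hb2⟩ := hb
  refine ⟨hab, ?_⟩
  have h3 : (p.take b).drop (b - a) = (p.take k).drop (k - a) := by
    rw [← hb2, List.drop_drop]
    congr 1
    omega
  rw [h3, ha2]

theorem pvBord_trans (p : List Char) (k l l' : Nat) (h1 : pvBord p k l) (h2 : pvBord p l l') :
    pvBord p k l' := by
  rw [pvBord_iff] at *
  obtain ⟨h11, h12⟩ := h1
  obtain ⟨h21, h22⟩ := h2
  refine ⟨by omega, ?_⟩
  have h3 : ((p.take k).drop (k - l)).drop (l - l') = p.take l' := by rw [h12, h22]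
  rw [List.drop_drop] at h3
  rw [show k - l' = (k - l) + (l - l') by omega]
  exact h3

theorem pv_take_succ_getD (l : List Char) (k : Nat) (hk : k < l.length) :
    l.take (k+1) = l.take k ++ [l.getD k ' '] := by
  rw [List.take_add_one, List.getElem?_eq_getElem hk, List.getD_eq_getElem l ' ' hk]
  rfl

theorem pvBord_step (p : List Char) (k l : Nat) (h : pvBord p (k+1) l) (hl : 1 ≤ l)
    (hk : k < p.length) :
    pvBord p k (l-1) ∧ p.getD (l-1) ' ' = p.getD k ' ' := by
  rw [pvBord_iff] at h
  obtain ⟨h1, h2⟩ := h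
  have hlk : l - 1 < p.length := by omega
  have h2' : (p.take k ++ [p.getD k ' ']).drop (k+1-l) = p.take (l-1) ++ [p.getD (l-1) ' '] := by
    rw [← pv_take_succ_getD p k hk, ← pv_take_succ_getD p (l-1) hlk,
        show l - 1 + 1 = l by omega]
    exact h2
  rw [List.drop_append_of_le_length (by simp [List.length_take]; omega)] at h2'
  obtain ⟨hL, hR⟩ := List.append_inj' h2' (by simp)
  constructor
  · rw [pvBord_iff]
    refine ⟨by omega, ?_⟩
    rw [show k - (l - 1) = k + 1 - l by omega]
    exact hL
  · have := hR
    simp at this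
    exact this.symm

theorem pvBord_extend (p : List Char) (k l : Nat) (h : pvBord p k l)
    (hc : p.getD l ' ' = p.getD k ' ') (hk : k < p.length) : pvBord p (k+1) (l+1) := by
  rw [pvBord_iff] at *
  obtain ⟨h1, h2⟩ := h
  refine ⟨by omega, ?_⟩
  have hlp : l < p.length := by omega
  rw [pv_take_succ_getD p k hk, pv_take_succ_getD p l hlp,
      show k + 1 - (l + 1) = k - l by omega,
      List.drop_append_of_le_length (by simp [List.length_take]; omega), h2, hc]

theorem le_pvMaxBord (p : List Char) (k l : Nat) (h : pvBord p k l) : l ≤ pvMaxBord p k := by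
  have hlk : l < k := ((pvBord_iff p k l).mp h).1
  exact Nat.le_findGreatest (by omega) h

theorem pvMaxBord_bord (p : List Char) (k : Nat) (hk : 1 ≤ k) : pvBord p k (pvMaxBord p k) :=
  Nat.findGreatest_spec (m := 0) (by omega) (pvBord_zero p k hk)

theorem pvMaxBord_lt (p : List Char) (k : Nat) (hk : 1 ≤ k) : pvMaxBord p k < k :=
  ((pvBord_iff _ _ _).mp (pvMaxBord_bord p k hk)).1

-- matching a border of the matched prefix against the text
theorem pvMatch_of_bord (t p : List Char) (i j l : Nat) (hj : j ≤ i)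
    (h2 : (t.drop (i-j)).take j = p.take j) (hb : pvBord p j l) :
    (t.drop (i-l)).take l = p.take l := by
  rw [pvBord_iff] at hb
  obtain ⟨hlj, hb2⟩ := hb
  have h3 : ((t.drop (i-j)).take j).drop (j - l) = p.take l := by rw [h2, hb2]
  rw [List.drop_take, List.drop_drop] at h3
  rw [show j - (j - l) = l by omega, show (i - j) + (j - l) = i - l by omega] at h3
  exact h3

-- an occurrence of p inside the matched region yields a border
theorem pvBord_of_occ (t p : List Char) (i j q : Nat) (hj : j ≤ i) (hjp : j ≤ p.length)
    (h2 : (t.drop (i-j)).take j = p.take j) (hq1 : i - j < q) (hq2 : q < i)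
    (hocc : p <+: t.drop q) : pvBord p j (i - q) := by
  have hl1 : 1 ≤ i - q := by omega
  have hlj : i - q < j := by omega
  rw [pvBord_iff]
  refine ⟨hlj, ?_⟩
  obtain ⟨s, hs⟩ := hocc
  have hm : i - q ≤ p.length := by omega
  have h3 : (t.drop q).take (i - q) = p.take (i - q) := by
    rw [← hs, List.take_append_of_le_length hm]
  have h4 : ((t.drop (i-j)).take j).drop (j - (i - q)) = (t.drop q).take (i - q) := by
    rw [List.drop_take, List.drop_drop, show j - (j - (i - q)) = i - q by omega,
        show (i - j) + (j - (i - q)) = q by omega]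
  rw [← h2, h4, h3]

theorem pv_occ_getD (t p : List Char) (q r : Nat) (hocc : p <+: t.drop q) (hr : r < p.length) :
    p.getD r ' ' = t.getD (q + r) ' ' := by
  obtain ⟨s, hs⟩ := hocc
  rw [List.getD_eq_getElem?_getD, List.getD_eq_getElem?_getD, ← List.getElem?_drop, ← hs,
      List.getElem?_append_left hr]

theorem pv_getD_set_self (l : List Nat) (i v : Nat) (h : i < l.length) :
    (l.set i v).getD i 0 = v := by
  rw [List.getD_eq_getElem _ 0 (by simpa using h)]
  exact List.getElem_set_self _

theorem pv_getD_set_ne (l : List Nat) (i k v : Nat) (h : i ≠ k) :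
    (l.set i v).getD k 0 = l.getD k 0 := by
  by_cases hk : k < l.length
  · rw [List.getD_eq_getElem _ 0 (by simpa using hk), List.getD_eq_getElem _ 0 hk]
    exact List.getElem_set_ne h _
  · rw [List.getD_eq_default _ 0 (by simp; omega), List.getD_eq_default _ 0 (by omega)]

-- ===== correctness of the LPS loop =====
theorem pvLps_correct (p : List Char) : ∀ (fuel : Nat) (lps : List Nat) (length i : Nat),
    lps.length = p.length → 1 ≤ i → i ≤ p.length →
    (∀ k, k < i → lps.getD k 0 = pvMaxBord p (k+1)) →
    pvBord p i length →
    (i < p.length → ∀ l, pvBord p (i+1) l → l ≤ length + 1) →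
    2*(p.length - i) + length + 1 ≤ fuel →
    ∀ k, k < p.length → (pvLpsLoop fuel lps length i p).getD k 0 = pvMaxBord p (k+1) := by
  intro fuel
  induction fuel with
  | zero => intro lps length i _ _ _ _ _ _ hfuel; omega
  | succ fuel ih =>
    intro lps length i hlen hi1 him hprev hb hmax hfuel k hk
    rw [pvLpsLoop]
    by_cases hiltm : i < p.length
    · simp only [if_pos hiltm]
      have hlti : length < i := ((pvBord_iff _ _ _).mp hb).1
      by_cases hc : p.getD i ' ' = p.getD length ' '
      · -- match branch
        simp only [if_pos hc]
        have hbnew : pvBord p (i+1) (length+1) :=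
          pvBord_extend p i length hb hc.symm hiltm
        have hmaxeq : pvMaxBord p (i+1) = length + 1 :=
          Nat.le_antisymm (hmax hiltm _ (pvMaxBord_bord p (i+1) (by omega)))
            (le_pvMaxBord p (i+1) (length+1) hbnew)
        apply ih (lps.set i (length+1)) (length+1) (i+1)
        · simp [hlen]
        · omega
        · omega
        · intro k' hk'
          by_cases hki : k' = i
          · subst hki
            rw [pv_getD_set_self lps k' (length+1) (by omega)]
            exact hmaxeq.symm
          · rw [pv_getD_set_ne lps i k' (length+1) (by omega)]
            exact hprev k' (by omega)
        · exact hbnew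
        · intro hi1m l hl
          rcases Nat.eq_zero_or_pos l with h0 | h1
          · omega
          · have := pvBord_step p (i+1) l hl h1 hi1m
            have : l - 1 ≤ pvMaxBord p (i+1) := le_pvMaxBord p (i+1) (l-1) this.1
            omega
        · omega
        · exact hk
      · -- mismatch
        simp only [if_neg hc]
        by_cases hlz : length ≠ 0
        · simp only [if_pos hlz]
          have hlget : lps.getD (length - 1) 0 = pvMaxBord p length := by
            have := hprev (length - 1) (by omega)
            rwa [show length - 1 + 1 = length by omega] at this
          have hbl : pvBord p length (pvMaxBord p length) := pvMaxBord_bord p length (by omega)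
          apply ih lps (lps.getD (length-1) 0) i hlen hi1 him hprev
          · rw [hlget]; exact pvBord_trans p i length _ hb hbl
          · intro him2 l hl
            rcases Nat.eq_zero_or_pos l with h0 | h1
            · omega
            · obtain ⟨hstep, hchar⟩ := pvBord_step p i l hl h1 hiltm
              have hlle : l ≤ length + 1 := hmax hiltm l hl
              have hlne : l ≠ length + 1 := by
                intro he
                apply hc
                rw [← hchar, he]
                simp
              have hll : l - 1 < length := by omega
              have : pvBord p length (l - 1) := pvBord_nest p i (l-1) length hstep hb hll
              have := le_pvMaxBord p length (l-1) this
              rw [hlget]; omega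
          · have : pvMaxBord p length < length := pvMaxBord_lt p length (by omega)
            rw [hlget]; omega
          · exact hk
        · -- length = 0
          simp only [if_neg hlz]
          push Not at hlz
          subst hlz
          have hallz : ∀ l, pvBord p (i+1) l → l = 0 := by
            intro l hl
            rcases Nat.eq_zero_or_pos l with h0 | h1
            · exact h0
            · obtain ⟨hstep, hchar⟩ := pvBord_step p i l hl h1 hiltm
              have : l ≤ 0 + 1 := hmax hiltm l hl
              have hl1 : l = 1 := by omega
              exfalso
              apply hc
              rw [← hchar, hl1]
          have hmz : pvMaxBord p (i+1) = 0 := hallz _ (pvMaxBord_bord p (i+1) (by omega))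
          apply ih (lps.set i 0) 0 (i+1)
          · simp [hlen]
          · omega
          · omega
          · intro k' hk'
            by_cases hki : k' = i
            · subst hki
              rw [pv_getD_set_self lps k' 0 (by omega)]
              exact hmz.symm
            · rw [pv_getD_set_ne lps i k' 0 (by omega)]
              exact hprev k' (by omega)
          · exact pvBord_zero p (i+1) (by omega)
          · intro hi1m l hl
            rcases Nat.eq_zero_or_pos l with h0 | h1
            · omega
            · obtain ⟨hstep, _⟩ := pvBord_step p (i+1) l hl h1 hi1m
              have := hallz (l-1) hstep
              omega
          · omega
          · exact hk
    · simp only [if_neg hiltm]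
      exact hprev k (by omega)

theorem pvComputeLps_correct (p : List Char) (hmm : 1 ≤ p.length) :
    ∀ k, k < p.length → (pvComputeLps p).getD k 0 = pvMaxBord p (k+1) := by
  apply pvLps_correct p (2 * p.length + 1) (List.replicate p.length 0) 0 1
  · simp
  · omega
  · omega
  · intro k hk
    have hk0 : k = 0 := by omega
    subst hk0
    rw [List.getD_eq_getElem _ 0 (by simp; omega), List.getElem_replicate]
    simp [pvMaxBord]
  · exact pvBord_zero p 1 (by omega)
  · intro _ l hl
    have := ((pvBord_iff _ _ _).mp hl).1
    omega
  · omega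

-- findFrom returns exactly the first occurrence at or after s0 (or -1)
theorem pvFindFrom_eq_none (t p : List Char) (s0 : Nat) (hs0 : s0 ≤ t.length)
    (hno : ∀ q, s0 ≤ q → ¬ p <+: t.drop q) :
    PySem.Chars.findFrom t p (s0 : Int) none = -1 := by
  rw [PySem.Chars.findFrom_natCast_eq_neg_one_iff t p s0 hs0]
  intro hinf
  have : ∃ j, p <+: (t.drop s0).drop j := by
    rw [PySem.Chars.exists_prefix_drop_iff_isIn, PySem.Chars.isIn_iff_infix]
    exact hinf
  obtain ⟨j, hj⟩ := this
  rw [List.drop_drop] at hj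
  exact hno (s0 + j) (by omega) hj

theorem pvFindFrom_eq_some (t p : List Char) (s0 q0 : Nat) (hs0 : s0 ≤ t.length)
    (hq : s0 ≤ q0) (hocc : p <+: t.drop q0)
    (hno : ∀ q, s0 ≤ q → q < q0 → ¬ p <+: t.drop q) :
    PySem.Chars.findFrom t p (s0 : Int) none = (q0 : Int) := by
  rw [PySem.Chars.findFrom_natCast t p s0 hs0]
  have hinf : p <:+: t.drop s0 := by
    rw [← PySem.Chars.isIn_iff_infix, ← PySem.Chars.exists_prefix_drop_iff_isIn]
    exact ⟨q0 - s0, by rw [List.drop_drop, show s0 + (q0 - s0) = q0 by omega]; exact hocc⟩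
  have hne : PySem.Chars.find (t.drop s0) p ≠ -1 := by
    rw [PySem.Chars.find_ne_neg_one_iff]; exact hinf
  rw [if_neg hne]
  have hpos : 0 ≤ PySem.Chars.find (t.drop s0) p := by
    rw [PySem.Chars.find_nonneg_iff]; exact hinf
  obtain ⟨hfst, hmin⟩ := PySem.Chars.find_spec (s := t.drop s0) (sub := p) hpos
  set f := (PySem.Chars.find (t.drop s0) p).toNat with hf
  rw [List.drop_drop] at hfst
  have h1 : ¬ q0 - s0 < f := by
    intro hlt
    exact hmin _ hlt (by rw [List.drop_drop, show s0 + (q0 - s0) = q0 by omega]; exact hocc)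
  have h2 : ¬ f < q0 - s0 := by
    intro hlt
    exact hno (s0 + f) (by omega) (by omega) hfst
  have hfe : f = q0 - s0 := by omega
  have : PySem.Chars.find (t.drop s0) p = ((q0 - s0 : Nat) : Int) := by
    omega
  rw [this]
  omega

-- ===== the main simulation: the KMP loop equals the greedy find loop =====
theorem pvKmp_eq (t p : List Char) (lps : List Nat) (hm : 1 ≤ p.length)
    (hlps : ∀ k, k < p.length → lps.getD k 0 = pvMaxBord p (k+1)) :
    ∀ (fuelA fuelB : Nat) (res : List Int) (i j s0 : Nat),
    j < p.length → j ≤ i → i ≤ t.length →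
    (t.drop (i-j)).take j = p.take j →
    s0 ≤ i - j →
    (∀ q, s0 ≤ q → q < i - j → ¬ p <+: t.drop q) →
    2*(t.length - i) + j + 1 ≤ fuelA →
    t.length + 1 ≤ fuelB + s0 →
    pvKmpLoop fuelA res i j t p lps = res ++ pvGreedyLoop fuelB t p s0 := by
  intro fuelA
  induction fuelA with
  | zero => intro fuelB res i j s0 _ _ _ _ _ _ hfA _; omega
  | succ fuelA ih =>
    intro fuelB res i j s0 hjm hji hin h2 hs0 hno hfA hfB
    have hs0n : s0 ≤ t.length := by omega
    rw [pvKmpLoop]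
    by_cases hiltn : i < t.length
    · simp only [if_pos hiltn]
      by_cases hc : p.getD j ' ' = t.getD i ' '
      · -- character match: i+1, j+1
        simp only [if_pos hc]
        have h2' : (t.drop (i+1-(j+1))).take (j+1) = p.take (j+1) := by
          have hlen : j < (t.drop (i-j)).length := by simp; omega
          rw [show i+1-(j+1) = i - j by omega,
              pv_take_succ_getD (t.drop (i-j)) j hlen,
              pv_take_succ_getD p j (by omega), h2]
          congr 1
          rw [List.getD_eq_getElem _ ' ' hlen, List.getElem_drop,
              ← List.getD_eq_getElem t ' ' (by omega), show i - j + j = i by omega, ← hc]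
        by_cases hjm1 : j + 1 = p.length
        · -- full match found at q0 = i - j
          rw [if_pos hjm1]
          set q0 := i - j with hq0
          have hocc : p <+: t.drop q0 := by
            have htt : (t.drop q0).take (j+1) = p.take (j+1) := by
              rw [show q0 = i+1-(j+1) by omega]
              exact h2'
            have htt2 : (t.drop q0).take p.length = p := by
              rw [← hjm1, htt, hjm1, List.take_length]
            rw [← htt2]
            exact List.take_prefix _ _
          have hfind : PySem.Chars.findFrom t p (s0 : Int) none = (q0 : Int) :=
            pvFindFrom_eq_some t p s0 q0 hs0n (by omega) hocc hno
          obtain ⟨fuelB', rfl⟩ : ∃ fb, fuelB = fb + 1 := by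
            refine ⟨fuelB - 1, by omega⟩
          rw [pvGreedyLoop]
          simp only [hfind]
          rw [if_neg (by omega)]
          have hnext : (q0 : Int).toNat + p.length = i + 1 := by omega
          rw [hnext]
          have heq : ((i+1 : Nat) : Int) - ((j+1 : Nat) : Int) = (q0 : Int) := by
            push_cast; omega
          rw [heq]
          rw [ih fuelB' (res ++ [(q0 : Int)]) (i+1) 0 (i+1) hm (by omega) (by omega)
              (by simp) (by omega) (by omega) (by omega) (by omega)]
          simp
        · -- partial match continues
          rw [if_neg hjm1]
          by_cases hC : (i+1 < t.length ∧ p.getD (j+1) ' ' ≠ t.getD (i+1) ' ')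
          · simp only [if_pos hC]
            rw [if_pos (by omega)]
            have hlget : lps.getD (j+1-1) 0 = pvMaxBord p (j+1) := by
              have := hlps j (by omega)
              simpa using this
            set l' := pvMaxBord p (j+1) with hl'
            have hbl' : pvBord p (j+1) l' := pvMaxBord_bord p (j+1) (by omega)
            have hl'lt : l' < j + 1 := pvMaxBord_lt p (j+1) (by omega)
            rw [hlget]
            apply ih fuelB res (i+1) l' s0 (by omega) (by omega) (by omega)
            · exact pvMatch_of_bord t p (i+1) (j+1) l' (by omega) h2' hbl'
            · omega
            · -- no occurrence before i+1-l'
              intro q hq1 hq2 hocc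
              by_cases hqlt : q < i - j
              · exact hno q hq1 hqlt hocc
              · by_cases hqe : q = i - j
                · subst hqe
                  have := pv_occ_getD t p (i-j) (j+1) hocc (by omega)
                  rw [show i - j + (j+1) = i + 1 by omega] at this
                  exact hC.2 this
                · have hq3 : i+1-(j+1) < q := by omega
                  have hq4 : q < i + 1 := by omega
                  have hb := pvBord_of_occ t p (i+1) (j+1) q (by omega) (by omega) h2' (by omega) hq4 hocc
                  have := le_pvMaxBord p (j+1) (i+1-q) hb
                  omega
            · omega
            · omega
          · simp only [if_neg hC]
            apply ih fuelB res (i+1) (j+1) s0 (by omega) (by omega) (by omega) h2'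
              (by omega) (by rw [show i+1-(j+1) = i - j by omega]; exact hno) (by omega) hfB
      · -- character mismatch: i, j unchanged, then elif fires
        simp only [if_neg hc]
        rw [if_neg (by simpa using (by omega : j ≠ p.length))]
        rw [if_pos ⟨hiltn, hc⟩]
        by_cases hjz : j ≠ 0
        · simp only [if_pos hjz]
          have hlget : lps.getD (j-1) 0 = pvMaxBord p j := by
            have := hlps (j-1) (by omega)
            rwa [show j - 1 + 1 = j by omega] at this
          set l' := pvMaxBord p j with hl'
          have hbl' : pvBord p j l' := pvMaxBord_bord p j (by omega)
          have hl'lt : l' < j := pvMaxBord_lt p j (by omega)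
          rw [hlget]
          apply ih fuelB res i l' s0 (by omega) (by omega) hin
          · exact pvMatch_of_bord t p i j l' hji h2 hbl'
          · omega
          · intro q hq1 hq2 hocc
            by_cases hqlt : q < i - j
            · exact hno q hq1 hqlt hocc
            · by_cases hqe : q = i - j
              · subst hqe
                have := pv_occ_getD t p (i-j) j hocc (by omega)
                rw [show i - j + j = i by omega] at this
                exact hc this
              · have hb := pvBord_of_occ t p i j q hji (by omega) h2 (by omega) (by omega) hocc
                have := le_pvMaxBord p j (i-q) hb
                omega
          · omega
          · omega
        · simp only [if_neg hjz]
          push Not at hjz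
          subst hjz
          apply ih fuelB res (i+1) 0 s0 hm (by omega) (by omega) (by simp) (by omega)
          · intro q hq1 hq2 hocc
            by_cases hqlt : q < i
            · exact hno q hq1 (by omega) hocc
            · have hqe : q = i := by omega
              have h5 := pv_occ_getD t p q 0 hocc (by omega)
              rw [hqe] at h5
              simp at h5
              exact hc h5
          · omega
          · omega
    · -- loop exit: i = t.length; no occurrence at or after s0 remains
      simp only [if_neg hiltn]
      have hie : i = t.length := by omega
      obtain ⟨fuelB', rfl⟩ : ∃ fb, fuelB = fb + 1 := by
        refine ⟨fuelB - 1, by omega⟩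
      have hnone : PySem.Chars.findFrom t p (s0 : Int) none = -1 := by
        apply pvFindFrom_eq_none t p s0 hs0n
        intro q hq hocc
        by_cases hqlt : q < i - j
        · exact hno q hq hqlt hocc
        · have hle := hocc.length_le
          simp [List.length_drop] at hle
          omega
      rw [pvGreedyLoop]
      simp [hnone]

-- ===== VERDICT (by name: the statement is the Claim_ definition above) =====
theorem kmp_search_non_overlapping_spec : Claim_equal_kmp_search_non_overlapping := by
  intro text pattern _ hpre
  unfold Spec_kmp_search_non_overlapping
  by_cases hp : pattern.toList = []
  · have hpe : pattern = "" := by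
      cases pattern
      simp_all
    have hte : text = "" := hpre hpe
    subst hpe; subst hte
    decide
  · have hm : 1 ≤ pattern.toList.length := by
      cases h : pattern.toList with
      | nil => exact absurd h hp
      | cons a l => simp
    unfold kmp_search_non_overlapping kmp_search_non_overlapping_alt
    rw [if_neg hp]
    apply pvKmp_eq text.toList pattern.toList (pvComputeLps pattern.toList) hm
      (pvComputeLps_correct pattern.toList hm)
      (2 * text.toList.length + pattern.toList.length + 1) (text.toList.length + 1)
      [] 0 0 0 (by omega) (by omega) (by omega) (by simp) (by omega)
      (by intro q _ hq _; omega) (by omega) (by omega)
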